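-- pv_equiv track=rewrite | github.com/cmstas/ZMET2017Looper | SMSScans/getSignalNumbers_uncorr.py | combine_counts
-- ===== SOURCE A (Python) =====
-- def combine_counts(hists):
--     """ Combines counts from the year split histograms to create a single list. hists is a misnomer here """
--
--     final_yield = []
--     #Get the anchor
--     key = list(hists.keys())[0]
--     anchor_hist = hists[key] #for bin indexing
--     for bin_id in range(len(anchor_hist)):
--         temp = 0
--         for year in hists.keys():
--             temp += hists[year][bin_id]
--
--         final_yield.append(temp)
--
--     return final_yield
-- ===== SOURCE B (Python) =====
-- def combine_counts(hists):
--     """Year-major accumulation: copy the anchor year's counts, then add each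
--     remaining year's counts element-wise into the running vector."""
--     keys = list(hists.keys())
--     result = list(hists[keys[0]])
--     for year in keys[1:]:
--         row = hists[year]
--         for i in range(len(result)):
--             result[i] += row[i]
--     return result
-- ===== Notes on version B (the rewrite author's own statement) =====
-- stated objective: alternative
-- what changed: B replaces A's bin-major nested scan (a fresh sum over all years for every bin, re-looking the anchor up each time) by a year-major accumulation: it copies the anchor year's counts once and folds each remaining year into the running partial-sum vector in place.
import Mathlib
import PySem

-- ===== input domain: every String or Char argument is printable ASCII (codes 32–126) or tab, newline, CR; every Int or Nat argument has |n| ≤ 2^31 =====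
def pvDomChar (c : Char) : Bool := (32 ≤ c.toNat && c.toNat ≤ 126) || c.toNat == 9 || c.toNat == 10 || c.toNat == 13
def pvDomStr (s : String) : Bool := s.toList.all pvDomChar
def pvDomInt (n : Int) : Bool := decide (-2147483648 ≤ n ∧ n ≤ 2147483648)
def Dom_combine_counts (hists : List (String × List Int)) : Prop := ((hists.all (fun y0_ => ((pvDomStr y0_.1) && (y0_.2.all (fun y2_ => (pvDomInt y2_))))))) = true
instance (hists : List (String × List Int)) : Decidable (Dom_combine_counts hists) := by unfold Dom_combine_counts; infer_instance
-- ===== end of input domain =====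

-- B replaces A's bin-major nested re-summation by a year-major in-place accumulation over a copy of the anchor year's counts (alternative decomposition, same cost).


-- ===== PORT A =====
-- Literal port of A; the assoc-list argument is the Python dict, built with PySem.Dict.ofList.
-- list(hists.keys())[0] raises IndexError on an empty dict, and hists[year][bin_id] raises
-- IndexError on a year shorter than the anchor: Pre_ excludes exactly those inputs, so the
-- `headD ""` / `.getD _ 0` defaults are never reached on admitted inputs.
def combine_counts (hists : List (String × List Int)) : List Int :=
  let d := PySem.Dict.ofList hists
  let key := (PySem.Dict.keys d).headD ""
  let anchor_hist := PySem.Dict.getD d key []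
  (List.range anchor_hist.length).foldl
    (fun final_yield bin_id =>
      final_yield ++
        [(PySem.Dict.keys d).foldl
          (fun temp year => temp + (PySem.Dict.getD d year []).getD bin_id 0) 0])
    []

-- ===== PORT B =====
-- Port of Source B: copy the anchor year's counts, then fold each remaining year in, adding
-- element-wise at every index of the running result (same defaults, unreachable under Pre_).
def combine_counts_alt (hists : List (String × List Int)) : List Int :=
  let d := PySem.Dict.ofList hists
  let keys := PySem.Dict.keys d
  let result := PySem.Dict.getD d (keys.headD "") []
  (keys.drop 1).foldl
    (fun result year =>
      let row := PySem.Dict.getD d year []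
      (List.range result.length).foldl
        (fun res i => res.set i (res.getD i 0 + row.getD i 0)) result)
    result

-- ===== PRECONDITION & SPEC =====
-- Pre_ = exactly where the Python A returns: the dict is nonempty and no year's list is
-- shorter than the first (anchor) year's list (otherwise IndexError; B raises there too).
def Pre_combine_counts (hists : List (String × List Int)) : Prop :=
  hists ≠ [] ∧
  ∀ p ∈ (PySem.Dict.ofList hists).items,
    ((PySem.Dict.ofList hists).items.headD ("", [])).2.length ≤ p.2.length
instance (hists : List (String × List Int)) : Decidable (Pre_combine_counts hists) := by
  unfold Pre_combine_counts; infer_instance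

def pvWitness_combine_counts : (List (String × List Int)) :=
  [("2016", [1, 2, 3]), ("2017", [4, 5, 6]), ("2018", [7, 8, 9])]

def Spec_combine_counts (hists : List (String × List Int)) (out : List Int) : Prop := out = combine_counts_alt hists
instance (hists : List (String × List Int)) (out : List Int) : Decidable (Spec_combine_counts hists out) := by unfold Spec_combine_counts; infer_instance

-- ===== CLAIM (what is proved, stated in full; the proofs are below) =====
def Claim_equal_combine_counts : Prop := ∀ (hists : List (String × List Int)), Dom_combine_counts hists → Pre_combine_counts hists → Spec_combine_counts hists (combine_counts hists)

-- ===== LEMMAS AND PROOFS =====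

-- B's inner loop: setting res[i] := res[i] + row[i] for i = 0..n-1 (n ≤ res.length)
-- rewrites the first n entries to the element-wise sums and leaves the tail untouched.
theorem pv_setloop (row : List Int) :
    ∀ (n : Nat) (res : List Int), n ≤ res.length →
      (List.range n).foldl (fun r i => r.set i (r.getD i 0 + row.getD i 0)) res
        = (List.range n).map (fun i => res.getD i 0 + row.getD i 0) ++ res.drop n := by
  intro n
  induction n with
  | zero => intro res _; simp
  | succ n ih =>
    intro res h
    have hn : n < res.length := by omega
    rw [List.range_succ, List.foldl_append, List.map_append, ih res (by omega)]
    simp only [List.foldl_cons, List.foldl_nil, List.map_cons, List.map_nil]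
    have hM : ((List.range n).map (fun i => res.getD i 0 + row.getD i 0)).length = n := by simp
    have hd : res.drop n = res[n] :: res.drop (n+1) := by
      rw [List.drop_eq_getElem_cons hn]
    rw [hd]
    have hget : (((List.range n).map (fun i => res.getD i 0 + row.getD i 0)) ++ res[n] :: res.drop (n+1)).getD n 0
        = res.getD n 0 := by
      rw [List.getD_eq_getElem?_getD, List.getElem?_append_right (by omega)]
      simp
    rw [hget]
    rw [List.set_append_right _ _ (by omega)]
    simp
    rw [hd]; rfl

-- B's outer year-major fold, characterised as a map over bin indices: bin j of the final
-- vector is the fold of all rows' j-th entries starting from the initial vector's j-th entry.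
theorem pv_outer (g : String → List Int) :
    ∀ (ks : List String) (res : List Int),
      ks.foldl
        (fun result year =>
          (List.range result.length).foldl
            (fun res i => res.set i (res.getD i 0 + (g year).getD i 0)) result)
        res
      = (List.range res.length).map
          (fun j => ks.foldl (fun t y => t + (g y).getD j 0) (res.getD j 0)) := by
  intro ks
  induction ks with
  | nil =>
    intro res
    simp only [List.foldl_nil]
    apply List.ext_getElem (by simp)
    intro j h1 h2
    simp [List.getElem?_eq_getElem h1]
  | cons y ks ih =>
    intro res
    simp only [List.foldl_cons]
    rw [pv_setloop (g y) res.length res le_rfl]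
    simp only [List.drop_length, List.append_nil]
    rw [ih]
    have hlen : ((List.range res.length).map (fun i => res.getD i 0 + (g y).getD i 0)).length = res.length := by simp
    rw [hlen]
    apply List.map_congr_left
    intro j hj
    have hj' : j < res.length := List.mem_range.mp hj
    congr 1
    rw [List.getD_eq_getElem _ _ (by simpa [hlen] using hj')]
    simp

-- ===== VERDICT (by name: the statement is the Claim_ definition above) =====
theorem combine_counts_spec : Claim_equal_combine_counts := by
  intro hists _ _
  unfold Spec_combine_counts combine_counts combine_counts_alt
  simp only
  rw [PySem.List.foldl_append_singleton_eq_map]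
  rw [pv_outer (fun y => PySem.Dict.getD (PySem.Dict.ofList hists) y [])]
  cases hk : PySem.Dict.keys (PySem.Dict.ofList hists) with
  | nil =>
    have : PySem.Dict.getD (PySem.Dict.ofList hists) ((List.nil (α := String)).headD "") [] = [] := by
      apply PySem.Dict.getD_of_not_contains
      rw [← Bool.not_eq_true, PySem.Dict.contains_iff_mem_keys, hk]
      simp
    rw [this]
    simp
  | cons k ks =>
    simp only [List.headD_cons, List.drop_one, List.tail_cons, List.foldl_cons, zero_add]
    simp
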